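-- pv_equiv track=rewrite | github.com/AndreWongZH/adventofcode | 2017/day4.py | ana
-- ===== SOURCE A (Python) =====
-- def anagramChecker(word, another_word):
-- 	if len(word) != len(another_word):
-- 		return False
-- 	else:
-- 		list1 = []
-- 		for letter in word:
-- 			list1.append(letter)
--
-- 		list2 = []
-- 		for letter in another_word:
-- 			list2.append(letter)
--
-- 		list1.sort()
-- 		list2.sort()
--
-- 		for x in range(len(list1)):
-- 			if list1[x] != list2[x]:
-- 				return False
-- 		else:
-- 			return True
--
-- def ana(listword):
-- 	for x in range(len(listword)):
-- 		if x != len(listword) - 1: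
-- 			combinedList = listword[:x] + listword[x+1:]
-- 			for word in combinedList:
-- 				if (anagramChecker(listword[x], word)):
-- 					return False
-- 		elif x == len(listword) - 1:
-- 			combinedList = listword[:x]
-- 			for word in combinedList:
-- 				if (anagramChecker(listword[x], word)):
-- 					return False
-- 	else:
-- 		return True
-- ===== SOURCE B (Python) =====
-- def ana(listword):
--     sigs = sorted(''.join(sorted(w)) for w in listword)
--     for a, b in zip(sigs, sigs[1:]):
--         if a == b:
--             return False
--     return True
-- ===== Notes on version B (the rewrite author's own statement) =====
-- stated objective: alternative
-- what changed: A compares every pair of words with a per-pair sort inside a nested loop; B computes one sorted-letter signature per word, sorts the signature list once, and detects a duplicate in a single adjacent-pair scan; this trades A's quadratic all-pairs worst case for a sort, but A's early exit can win on duplicate-heavy inputs.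
import Mathlib
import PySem

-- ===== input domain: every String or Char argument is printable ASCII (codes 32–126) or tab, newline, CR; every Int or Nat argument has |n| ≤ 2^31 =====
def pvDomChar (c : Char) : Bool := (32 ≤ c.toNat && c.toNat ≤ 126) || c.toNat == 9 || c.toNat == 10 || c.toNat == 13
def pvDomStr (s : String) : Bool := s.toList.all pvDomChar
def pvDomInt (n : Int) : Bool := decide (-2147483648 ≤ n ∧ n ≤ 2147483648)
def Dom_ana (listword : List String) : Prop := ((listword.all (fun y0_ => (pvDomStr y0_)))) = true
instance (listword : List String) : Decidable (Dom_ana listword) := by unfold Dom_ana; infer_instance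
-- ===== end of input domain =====

-- B replaces A's all-pairs anagram comparison by one sorted-signature pass (alternative algorithm):
-- compute one sorted-letter signature per word, sort the signatures, scan adjacent pairs.

-- ===== PORT A =====
def anagramChecker (word another_word : String) : Bool :=
  if word.toList.length ≠ another_word.toList.length then false
  else
    let list1 := word.toList.foldl (fun acc letter => acc ++ [letter]) []
    let list2 := another_word.toList.foldl (fun acc letter => acc ++ [letter]) []
    let list1 := PySem.List.sorted list1 (fun c => c) false
    let list2 := PySem.List.sorted list2 (fun c => c) false
    (PySem.List.pyRange 0 (list1.length : Int) 1).all
      (fun x => PySem.List.pyGet? list1 x == PySem.List.pyGet? list2 x)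

def anaLoop (listword : List String) : List Int → Bool
  | [] => true
  | x :: rest =>
    if x ≠ (listword.length : Int) - 1 then
      let combinedList := PySem.List.slice listword none (some x) ++
                          PySem.List.slice listword (some (x + 1)) none
      if combinedList.any (fun word => anagramChecker (PySem.List.pyGetD listword x "") word) then
        false
      else anaLoop listword rest
    else if x = (listword.length : Int) - 1 then
      let combinedList := PySem.List.slice listword none (some x)
      if combinedList.any (fun word => anagramChecker (PySem.List.pyGetD listword x "") word) then
        false
      else anaLoop listword rest
    else anaLoop listword rest

def ana (listword : List String) : Bool :=
  anaLoop listword (PySem.List.pyRange 0 (listword.length : Int) 1)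

-- ===== PORT B =====
-- ''.join(sorted(w)) : the sorted-letter signature of a word
def pvSig (w : String) : String :=
  String.ofList (PySem.List.sorted w.toList (fun c => c) false)

-- the zip(sigs, sigs[1:]) adjacent-pair scan
def pvAdjScan : List String → Bool
  | a :: b :: t => if a == b then false else pvAdjScan (b :: t)
  | _ => true

def ana_alt (listword : List String) : Bool :=
  pvAdjScan (PySem.List.sorted (listword.map pvSig) (fun s => s) false)

-- ===== PRECONDITION & SPEC =====
def Spec_ana (listword : List String) (out : Bool) : Prop := out = ana_alt listword
instance (listword : List String) (out : Bool) : Decidable (Spec_ana listword out) := by unfold Spec_ana; infer_instance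

-- ===== CLAIM (what is proved, stated in full; the proofs are below) =====
def Claim_equal_ana : Prop := ∀ (listword : List String), Dom_ana listword → Spec_ana listword (ana listword)

-- ===== LEMMAS AND PROOFS =====

lemma pvSig_eq_iff (w v : String) :
    pvSig w = pvSig v ↔
      PySem.List.sorted w.toList (fun c => c) false = PySem.List.sorted v.toList (fun c => c) false := by
  unfold pvSig
  constructor
  · intro h; simpa using congrArg String.toList h
  · intro h; rw [h]

-- the index loop comparing two equal-length lists elementwise is list equality
lemma allGet_eq (l1 l2 : List Char) (h : l1.length = l2.length) :
    ((List.range l1.length).all (fun k => l1[k]? == l2[k]?)) = decide (l1 = l2) := by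
  by_cases he : l1 = l2
  · subst he; simp
  · simp only [he, decide_false]
    rw [List.all_eq_false]
    have : ¬ ∀ i : Nat, l1[i]? = l2[i]? := fun hall => he (List.ext_getElem? hall)
    obtain ⟨i, hi⟩ := not_forall.mp this
    have hilt : i < l1.length := by
      by_contra hge
      have h1 : l1[i]? = none := List.getElem?_eq_none (by omega)
      have h2 : l2[i]? = none := List.getElem?_eq_none (by omega)
      exact hi (h1.trans h2.symm)
    exact ⟨i, List.mem_range.mpr hilt, by simpa using hi⟩

lemma anagramChecker_eq (w v : String) :
    anagramChecker w v = decide (pvSig w = pvSig v) := by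
  unfold anagramChecker
  simp only [PySem.List.foldl_append_singleton_eq_self, List.nil_append]
  by_cases hlen : w.toList.length = v.toList.length
  · have hsl : (PySem.List.sorted w.toList (fun c => c) false).length =
        (PySem.List.sorted v.toList (fun c => c) false).length := by
      rw [PySem.List.length_sorted, PySem.List.length_sorted]; exact hlen
    simp only [hlen, ne_eq, not_true_eq_false, if_false]
    have hdec : decide (pvSig w = pvSig v) =
        decide (PySem.List.sorted w.toList (fun c => c) false =
                PySem.List.sorted v.toList (fun c => c) false) := by
      simp only [decide_eq_decide]; exact pvSig_eq_iff w v
    rw [hdec, PySem.List.pyRange_one 0 _]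
    simp only [sub_zero, Int.toNat_natCast, zero_add, List.all_map]
    rw [← allGet_eq _ _ hsl]
    refine List.all_congr rfl (fun k => ?_)
    simp [PySem.List.pyGet?_natCast]
  · simp only [ne_eq, hlen, not_false_eq_true, if_true]
    have : ¬ pvSig w = pvSig v := by
      rw [pvSig_eq_iff]
      intro h
      exact hlen (by
        have := congrArg List.length h
        simpa [PySem.List.length_sorted] using this)
    simp [this]

-- A's loop is an `all` over the remaining indices
lemma anaLoop_eq_all (l : List String) (xs : List Int) :
    anaLoop l xs = xs.all (fun x =>
      !((if x ≠ (l.length : Int) - 1 then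
           PySem.List.slice l none (some x) ++ PySem.List.slice l (some (x + 1)) none
         else
           PySem.List.slice l none (some x)).any
          (fun word => anagramChecker (PySem.List.pyGetD l x "") word))) := by
  induction xs with
  | nil => rfl
  | cons x rest ih =>
    by_cases hx : x = (l.length : Int) - 1
    · simp only [anaLoop, hx, ne_eq, not_true_eq_false, if_false, if_true,
        List.all_cons]
      by_cases hany : (PySem.List.slice l none (some ((l.length : Int) - 1))).any
          (fun word => anagramChecker (PySem.List.pyGetD l ((l.length : Int) - 1) "") word)
      · simp [hany]
      · simp [hany, ih]
    · simp only [anaLoop, hx, ne_eq, not_false_eq_true, if_true, List.all_cons]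
      by_cases hany : (PySem.List.slice l none (some x) ++
          PySem.List.slice l (some (x + 1)) none).any
          (fun word => anagramChecker (PySem.List.pyGetD l x "") word)
      · simp [hany]
      · simp [hany, ih]

-- A returns true exactly when no two distinct positions carry anagram words
lemma ana_eq_true_iff (l : List String) :
    ana l = true ↔ l.Pairwise (fun a b => pvSig a ≠ pvSig b) := by
  rw [ana, anaLoop_eq_all, List.all_eq_true]
  constructor
  · intro h
    rw [List.pairwise_iff_getElem]
    intro i j hi hj hij
    have hx : ((i : Int)) ∈ PySem.List.pyRange 0 (l.length : Int) 1 := by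
      rw [PySem.List.mem_pyRange_one]; omega
    have hxne : (i : Int) ≠ (l.length : Int) - 1 := by omega
    have := h _ hx
    simp only [hxne, ne_eq, not_false_eq_true, if_true, Bool.not_eq_eq_eq_not,
      Bool.not_true, List.any_eq_false] at this
    have hmem : l[j] ∈ PySem.List.slice l none (some ((i : Int))) ++
        PySem.List.slice l (some ((i : Int) + 1)) none := by
      rw [PySem.List.slice_to_natCast]
      have : ((i : Int) + 1) = ((i + 1 : Nat) : Int) := by push_cast; ring
      rw [this, PySem.List.slice_from_natCast]
      refine List.mem_append.mpr (Or.inr ?_)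
      have : l[j] = (l.drop (i + 1))[j - (i + 1)]'(by rw [List.length_drop]; omega) := by
        rw [List.getElem_drop]; congr 1; omega
      rw [this]; exact List.getElem_mem _
    have := this _ hmem
    rw [anagramChecker_eq] at this
    simp only [PySem.List.pyGetD_natCast, List.getD_eq_getElem?_getD, List.getElem?_eq_getElem hi,
      Option.getD_some] at this
    simpa using this
  · intro hp x hx
    rw [PySem.List.mem_pyRange_one] at hx
    obtain ⟨i, rfl⟩ : ∃ i : Nat, x = (i : Int) := ⟨x.toNat, (Int.toNat_of_nonneg hx.1).symm⟩
    have hi : i < l.length := by exact_mod_cast hx.2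
    have hpg : ∀ j, ∀ hj : j < l.length, j ≠ i → pvSig l[i] ≠ pvSig (l[j]'hj) := by
      intro j hj hji
      rw [List.pairwise_iff_getElem] at hp
      rcases Nat.lt_or_ge i j with hlt | hge
      · exact hp i j hi hj hlt
      · have : j < i := by omega
        exact fun he => hp j i hj hi this he.symm
    have hnot : ∀ w ∈ (if (i : Int) ≠ (l.length : Int) - 1 then
           PySem.List.slice l none (some (i : Int)) ++ PySem.List.slice l (some ((i : Int) + 1)) none
         else
           PySem.List.slice l none (some (i : Int))),
        anagramChecker (PySem.List.pyGetD l (i : Int) "") w = false := by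
      intro w hw
      have hw' : ∃ j, ∃ hj : j < l.length, j ≠ i ∧ w = l[j] := by
        split_ifs at hw with hc
        · rw [PySem.List.slice_to_natCast] at hw
          have hcast : ((i : Int) + 1) = ((i + 1 : Nat) : Int) := by push_cast; ring
          rw [hcast, PySem.List.slice_from_natCast] at hw
          rcases List.mem_append.mp hw with hw1 | hw2
          · obtain ⟨j, hjlen, rfl⟩ := List.mem_iff_getElem.mp hw1
            have hjlt : j < i := by have := hjlen; simp at this; omega
            exact ⟨j, by omega, by omega, by rw [List.getElem_take]⟩
          · obtain ⟨j, hjlen, rfl⟩ := List.mem_iff_getElem.mp hw2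
            have hjlen' : j < l.length - (i + 1) := by simpa using hjlen
            exact ⟨i + 1 + j, by omega, by omega, by rw [List.getElem_drop]⟩
        · rw [PySem.List.slice_to_natCast] at hw
          obtain ⟨j, hjlen, rfl⟩ := List.mem_iff_getElem.mp hw
          have hjlt : j < i := by have := hjlen; simp at this; omega
          exact ⟨j, by omega, by omega, by rw [List.getElem_take]⟩
      obtain ⟨j, hj, hji, rfl⟩ := hw'
      rw [anagramChecker_eq]
      simp only [PySem.List.pyGetD_natCast, List.getD_eq_getElem?_getD,
        List.getElem?_eq_getElem hi, Option.getD_some, decide_eq_false_iff_not]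
      exact hpg j hj hji
    simp only [Bool.not_eq_eq_eq_not, Bool.not_true, List.any_eq_false]
    simpa using hnot

-- the adjacent scan on a ≤-Pairwise list decides Nodup
lemma adjScan_eq_nodup (ys : List String) (h : ys.Pairwise (· ≤ ·)) :
    pvAdjScan ys = decide ys.Nodup := by
  induction ys with
  | nil => simp [pvAdjScan]
  | cons a t ih =>
    cases t with
    | nil => simp [pvAdjScan]
    | cons b t' =>
      rcases List.pairwise_cons.mp h with ⟨hale, htail⟩
      by_cases hab : a = b
      · subst hab
        simp [pvAdjScan]
      · have hscan : pvAdjScan (a :: b :: t') = pvAdjScan (b :: t') := by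
          simp [pvAdjScan, hab]
        rw [hscan, ih htail]
        have hnot : a ∉ b :: t' := by
          intro hmem
          rcases List.mem_cons.mp hmem with rfl | hmem'
          · exact hab rfl
          · have hba : b ≤ a := (List.pairwise_cons.mp htail).1 a hmem'
            exact hab (le_antisymm (hale b (by simp)) hba)
        congr 1
        simp [List.nodup_cons, hnot]

-- B returns true exactly when the signatures are pairwise distinct
lemma ana_alt_eq_true_iff (l : List String) :
    ana_alt l = true ↔ l.Pairwise (fun a b => pvSig a ≠ pvSig b) := by
  unfold ana_alt
  rw [adjScan_eq_nodup _ (PySem.List.sorted_pairwise _ _), decide_eq_true_eq]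
  rw [(PySem.List.sorted_perm (l.map pvSig) (fun s => s) false).nodup_iff]
  unfold List.Nodup
  rw [List.pairwise_map]

-- ===== VERDICT (by name: the statement is the Claim_ definition above) =====
theorem ana_spec : Claim_equal_ana := by
  intro listword _
  unfold Spec_ana
  rw [Bool.eq_iff_iff, ana_eq_true_iff, ana_alt_eq_true_iff]
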